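-- pv_equiv track=rewrite | github.com/priyamehta2772/cracking-the-coding-interview | Unit 10_ Sorting and Searching/10.11_peaks_and_valleys.py | sort_peaks_valleys
-- ===== SOURCE A (Python) =====
-- def sort_peaks_valleys(array):   # Time complexity: O(n)
--     if len(array) < 3:
--         return array
--     if array[0] > array[1]:
--         array[0], array[1] = array[1], array[0]
--     for i in range(2, len(array), 2):
--         if array[i] > array[i-1]:
--             array[i], array[i-1] = array[i-1], array[i]
--         if i+1 < len(array) and array[i] > array[i+1]:
--             array[i], array[i+1] = array[i+1], array[i]
--     return array
-- ===== SOURCE B (Python) =====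
-- def sort_peaks_valleys(array):
--     # Builds a fresh result list front-to-back from pairwise min/max of a
--     # carried "pending peak" value - no index swaps, no mutation of the input.
--     if len(array) < 3:
--         return array
--     out = [min(array[0], array[1])]
--     prev = max(array[0], array[1])
--     k = 2
--     while k + 1 < len(array):
--         m = min(prev, array[k])
--         out.append(max(prev, array[k]))
--         out.append(min(m, array[k + 1]))
--         prev = max(m, array[k + 1])
--         k += 2
--     if k < len(array):
--         out.append(max(prev, array[k]))
--         out.append(min(prev, array[k]))
--     else:
--         out.append(prev)
--     return out
-- ===== Notes on version B (the rewrite author's own statement) =====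
-- stated objective: alternative
-- what changed: Replaces A's in-place index-swap pass by a pure producer that consumes the input pairwise and emits a fresh output list front-to-back from min/max of a carried pending-peak value (no swaps, no mutation).
import Mathlib
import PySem

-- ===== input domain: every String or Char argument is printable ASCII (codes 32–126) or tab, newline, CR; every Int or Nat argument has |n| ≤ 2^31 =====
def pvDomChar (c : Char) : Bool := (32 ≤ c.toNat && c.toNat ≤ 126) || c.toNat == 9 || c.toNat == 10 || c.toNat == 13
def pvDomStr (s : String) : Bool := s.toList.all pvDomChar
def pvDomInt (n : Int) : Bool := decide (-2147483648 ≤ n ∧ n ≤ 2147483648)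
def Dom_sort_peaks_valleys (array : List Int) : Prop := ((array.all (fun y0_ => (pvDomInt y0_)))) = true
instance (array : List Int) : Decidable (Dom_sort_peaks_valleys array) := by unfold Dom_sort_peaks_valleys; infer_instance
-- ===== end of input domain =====

-- B replaces A's in-place index-swap pass by a pure producer: it consumes the input
-- pairwise and emits a fresh output list front-to-back from min/max of a carried
-- pending-peak value; objective: alternative. Python A mutates the list in place while
-- Python B builds a new list; the ports and the claim are about the returned value.

-- ===== PORT A =====
-- in-place double swap:  array[i], array[j] = array[j], array[i]
def pvSwap (l : List Int) (i j : Nat) : List Int :=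
  (l.set i (l.getD j 0)).set j (l.getD i 0)

-- one iteration of A's stride-2 loop body (i = even index, both `if`s of the body)
def pvStepA2 (l : List Int) (i : Nat) : List Int :=
  if i + 1 < l.length ∧ l.getD i 0 > l.getD (i+1) 0 then pvSwap l i (i+1) else l
def pvStepA (l : List Int) (i : Nat) : List Int :=
  pvStepA2 (if l.getD i 0 > l.getD (i-1) 0 then pvSwap l i (i-1) else l) i

def sort_peaks_valleys (array : List Int) : List Int :=
  if array.length < 3 then array
  else
    let a0 := if array.getD 0 0 > array.getD 1 0 then pvSwap array 0 1 else array
    (PySem.List.pyRange 2 (array.length : Int) 2).foldl (fun l j => pvStepA l j.toNat) a0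

-- ===== PORT B =====
-- Source B's while loop: carries the pending peak `prev`, consumes the remaining input
-- two elements per iteration, appends two outputs; the two tail cases are Source B's
-- final `if k < len(array): … else: …`.
def pvBLoop : Int → List Int → List Int
  | prev, [] => [prev]
  | prev, [y] => [max prev y, min prev y]
  | prev, y :: z :: rest =>
      max prev y :: min (min prev y) z :: pvBLoop (max (min prev y) z) rest

def sort_peaks_valleys_alt (array : List Int) : List Int :=
  if array.length < 3 then array
  else
    match array with
    | a :: b :: rest => min a b :: pvBLoop (max a b) rest
    | _ => array

-- ===== PRECONDITION & SPEC =====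
def Spec_sort_peaks_valleys (array : List Int) (out : List Int) : Prop := out = sort_peaks_valleys_alt array
instance (array : List Int) (out : List Int) : Decidable (Spec_sort_peaks_valleys array out) := by unfold Spec_sort_peaks_valleys; infer_instance

-- ===== CLAIM (what is proved, stated in full; the proofs are below) =====
def Claim_equal_sort_peaks_valleys : Prop := ∀ (array : List Int), Dom_sort_peaks_valleys array → Spec_sort_peaks_valleys array (sort_peaks_valleys array)

-- ===== LEMMAS AND PROOFS =====

theorem pvSwap_comm (l : List Int) (i j : Nat) (h : i ≠ j) : pvSwap l i j = pvSwap l j i := by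
  unfold pvSwap
  exact List.set_comm _ _ h

-- step-2 range lemmas
theorem pyRange_two_eq_nil {a b : Int} (h : b ≤ a) : PySem.List.pyRange a b 2 = [] := by
  rw [PySem.List.pyRange_of_pos a b (by norm_num)]
  simp [show ¬ a < b by omega]

theorem pyRange_two_cons {a b : Int} (h : a < b) :
    PySem.List.pyRange a b 2 = a :: PySem.List.pyRange (a+2) b 2 := by
  rw [PySem.List.pyRange_of_pos a b (by norm_num),
      PySem.List.pyRange_of_pos (a+2) b (by norm_num)]
  by_cases h2 : a + 2 < b
  · have hN : ((b - a + 2 - 1) / 2).toNat = ((b - (a+2) + 2 - 1) / 2).toNat + 1 := by omega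
    rw [if_pos h, if_pos h2, hN, List.range_succ_eq_map]
    simp only [List.map_cons, List.map_map]
    refine congrArg₂ List.cons (by ring) ?_
    apply List.map_congr_left
    intro k _
    simp only [Function.comp_apply]
    push_cast
    ring
  · have hN : ((b - a + 2 - 1) / 2).toNat = 1 := by omega
    rw [if_pos h, if_neg h2, hN]
    simp

-- getD / set / swap at positions addressed relative to a finalized prefix
theorem getD_mid (pre : List Int) (a : Int) (rest : List Int) :
    (pre ++ a :: rest).getD pre.length 0 = a := by
  simp [List.getD_append_right]

theorem set_mid (pre : List Int) (a : Int) (rest : List Int) (v : Int) :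
    (pre ++ a :: rest).set pre.length v = pre ++ v :: rest := by
  rw [List.set_append_right _ _ (le_refl _)]
  simp

theorem swap_adj (pre : List Int) (a b : Int) (rest : List Int) :
    pvSwap (pre ++ a :: b :: rest) pre.length (pre.length + 1) = pre ++ b :: a :: rest := by
  unfold pvSwap
  have h1 : (pre ++ a :: b :: rest).getD (pre.length + 1) 0 = b := by
    have := getD_mid (pre ++ [a]) b rest
    simpa using this
  have h0 : (pre ++ a :: b :: rest).getD pre.length 0 = a := getD_mid pre a _
  rw [h1, h0, set_mid pre a (b :: rest) b]
  have := set_mid (pre ++ [b]) b rest a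
  simpa using this

theorem swap_adj' (pre : List Int) (a b : Int) (rest : List Int) :
    pvSwap (pre ++ a :: b :: rest) (pre.length + 1) pre.length = pre ++ b :: a :: rest := by
  rw [pvSwap_comm _ _ _ (by omega)]
  exact swap_adj pre a b rest

-- A's full loop body at index |pre|+1 on a mid-list position (two-or-more remaining)
theorem stepA_mid (pre : List Int) (prev y z : Int) (rest : List Int) :
    pvStepA (pre ++ prev :: y :: z :: rest) (pre.length + 1)
      = pre ++ max prev y :: min (min prev y) z :: max (min prev y) z :: rest := by
  unfold pvStepA
  have hd : pre.length + 1 - 1 = pre.length := by omega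
  rw [hd]
  have hy : (pre ++ prev :: y :: z :: rest).getD (pre.length + 1) 0 = y := by
    have := getD_mid (pre ++ [prev]) y (z :: rest); simpa using this
  have hp : (pre ++ prev :: y :: z :: rest).getD pre.length 0 = prev := getD_mid pre prev _
  rw [hy, hp]
  have hfix : (if y > prev then pvSwap (pre ++ prev :: y :: z :: rest) (pre.length + 1) pre.length
      else pre ++ prev :: y :: z :: rest) = pre ++ max prev y :: min prev y :: z :: rest := by
    by_cases h : y ≤ prev
    · rw [if_neg (by omega), max_eq_left h, min_eq_right h]
    · push_neg at h
      rw [if_pos h, swap_adj', max_eq_right h.le, min_eq_left h.le]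
  rw [hfix]
  unfold pvStepA2
  set P := max prev y
  set m := min prev y
  have hL : pre ++ P :: m :: z :: rest = (pre ++ [P]) ++ m :: z :: rest := by simp
  have hm : (pre ++ P :: m :: z :: rest).getD (pre.length + 1) 0 = m := by
    rw [hL]
    have := getD_mid (pre ++ [P]) m (z :: rest); simpa using this
  have hz : (pre ++ P :: m :: z :: rest).getD (pre.length + 2) 0 = z := by
    rw [hL]
    have := getD_mid (pre ++ [P] ++ [m]) z rest; simpa [add_assoc] using this
  have hlen : pre.length + 1 + 1 < (pre ++ P :: m :: z :: rest).length := by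
    simp; omega
  rw [show pre.length + 1 + 1 = pre.length + 2 from rfl, hm, hz]
  by_cases h : m ≤ z
  · rw [if_neg (by simp; omega), min_eq_left h, max_eq_right h]
  · push_neg at h
    rw [if_pos ⟨by simpa using hlen, h⟩]
    rw [hL, show pre.length + 2 = (pre ++ [P]).length + 1 from by simp,
        show pre.length + 1 = (pre ++ [P]).length from by simp]
    rw [swap_adj (pre ++ [P]) m z rest]
    rw [min_eq_right h.le, max_eq_left h.le]
    simp

-- A's loop body on the final lone element (second guard false)
theorem stepA_last (pre : List Int) (prev y : Int) :
    pvStepA (pre ++ [prev, y]) (pre.length + 1) = pre ++ [max prev y, min prev y] := by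
  unfold pvStepA
  have hd : pre.length + 1 - 1 = pre.length := by omega
  rw [hd]
  have hy : (pre ++ [prev, y]).getD (pre.length + 1) 0 = y := by
    have := getD_mid (pre ++ [prev]) y []; simpa using this
  have hp : (pre ++ [prev, y]).getD pre.length 0 = prev := getD_mid pre prev _
  rw [hy, hp]
  have hfix : (if y > prev then pvSwap (pre ++ [prev, y]) (pre.length + 1) pre.length
      else pre ++ [prev, y]) = pre ++ [max prev y, min prev y] := by
    by_cases h : y ≤ prev
    · rw [if_neg (by omega), max_eq_left h, min_eq_right h]
    · push_neg at h
      rw [if_pos h]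
      have := swap_adj' pre prev y []
      simp only at this
      rw [this, max_eq_right h.le, min_eq_left h.le]
  rw [hfix]
  unfold pvStepA2
  rw [if_neg (by simp)]

-- main correspondence: A's remaining stride-2 fold on prefix ++ prev :: rest is
-- the prefix followed by B's loop on (prev, rest)
theorem foldA_eq (prev : Int) (rest : List Int) : ∀ (pre : List Int),
    (PySem.List.pyRange ((pre.length : Int) + 1) ((pre.length : Int) + 1 + rest.length) 2).foldl
      (fun l j => pvStepA l j.toNat) (pre ++ prev :: rest) = pre ++ pvBLoop prev rest := by
  induction prev, rest using pvBLoop.induct with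
  | case1 prev =>
    intro pre
    rw [pyRange_two_eq_nil (by simp)]
    rfl
  | case2 prev y =>
    intro pre
    rw [pyRange_two_cons (by simp only [List.length_cons, List.length_nil]; push_cast; omega), pyRange_two_eq_nil (by simp only [List.length_cons, List.length_nil]; push_cast; omega)]
    simp only [List.foldl_cons, List.foldl_nil]
    have ht : ((pre.length : Int) + 1).toNat = pre.length + 1 := by omega
    rw [ht]
    exact stepA_last pre prev y
  | case3 prev y z rest ih =>
    intro pre
    rw [pyRange_two_cons (by simp only [List.length_cons]; push_cast; omega)]
    simp only [List.foldl_cons]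
    have ht : ((pre.length : Int) + 1).toNat = pre.length + 1 := by omega
    rw [ht, stepA_mid]
    have hstruct : pre ++ max prev y :: min (min prev y) z :: max (min prev y) z :: rest
        = (pre ++ [max prev y, min (min prev y) z]) ++ max (min prev y) z :: rest := by simp
    have := ih (pre ++ [max prev y, min (min prev y) z])
    rw [hstruct]
    have hc1 : ((pre ++ [max prev y, min (min prev y) z]).length : Int) + 1
        = (pre.length : Int) + 1 + 2 := by simp; push_cast; ring
    rw [hc1] at this
    have hc2 : (pre.length : Int) + 1 + 2 + (rest.length : Int)
        = (pre.length : Int) + 1 + ((y :: z :: rest).length : Int) := by simp; push_cast; ring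
    rw [hc2] at this
    rw [this, List.append_assoc]
    conv_rhs => rw [pvBLoop]
    rfl

-- pvSwap at the head of the list
theorem swap_head (a b : Int) (rest : List Int) :
    pvSwap (a :: b :: rest) 0 1 = b :: a :: rest := by
  have := swap_adj [] a b rest
  simpa using this

-- ===== VERDICT (by name: the statement is the Claim_ definition above) =====
theorem sort_peaks_valleys_spec : Claim_equal_sort_peaks_valleys := by
  intro array _
  unfold Spec_sort_peaks_valleys sort_peaks_valleys sort_peaks_valleys_alt
  by_cases hs : array.length < 3
  · rw [if_pos hs, if_pos hs]
  · rw [if_neg hs, if_neg hs]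
    rcases array with _ | ⟨a, _ | ⟨b, rest⟩⟩
    · exact absurd (by simp) hs
    · exact absurd (by simp) hs
    · simp only
      have h0 : (a :: b :: rest).getD 0 0 = a := rfl
      have h1 : (a :: b :: rest).getD 1 0 = b := rfl
      rw [h0, h1]
      have hfix : (if a > b then pvSwap (a :: b :: rest) 0 1 else a :: b :: rest)
          = [min a b] ++ max a b :: rest := by
        by_cases h : a ≤ b
        · rw [if_neg (by omega), max_eq_right h, min_eq_left h]; rfl
        · push_neg at h
          rw [if_pos h, swap_head, min_eq_right h.le, max_eq_left h.le]; rfl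
      rw [hfix]
      have := foldA_eq (max a b) rest [min a b]
      have hc : (([min a b].length : Int) + 1) = (2 : Int) := by simp
      rw [hc] at this
      have hc2 : (2 : Int) + (rest.length : Int) = ((a :: b :: rest).length : Int) := by
        simp only [List.length_cons]; push_cast; ring
      rw [hc2] at this
      rw [this]
      rfl
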